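-- pv_equiv track=rewrite | github.com/Aldgamir/-2_- | Шифр перестановки-Рівень 2.py | encrypt_double_permutation
-- ===== SOURCE A (Python) =====
-- def transpose(matrix):
--     # Транспонування матриці
--     return [''.join(row) for row in zip(*matrix)]
--
-- def apply_permutation(matrix, key):
--     # Застосування перестановки до рядків або стовпців матриці
--     permuted_matrix = [''] * len(matrix)
--     for index, new_index in enumerate(key):
--         permuted_matrix[new_index - 1] = matrix[index]  # Використання правильного індексу
--     return permuted_matrix
--
-- def encrypt_double_permutation(text, key1, key2):
--     # Розраховуємо розміри матриці
--     rows = len(key1)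
--     cols = len(key2)
--     block_size = rows * cols
--     encrypted_text = ""
--
--     # Обробляємо текст блоками
--     for block_start in range(0, len(text), block_size):
--         block = text[block_start:block_start + block_size]
--         block = block.ljust(block_size)  # Заповнюємо пробілами, якщо потрібно
--
--         # Формуємо початкову матрицю
--         matrix = []
--         for i in range(0, len(block), cols):
--             matrix.append(block[i:i + cols])
--
--         # Застосовуємо першу перестановку (по стовпцях)
--         matrix = transpose(matrix)
--         matrix = apply_permutation(matrix, key2)
--
--         # Застосовуємо другу перестановку (по рядках)
--         matrix = transpose(matrix)
--         matrix = apply_permutation(matrix, key1)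
--
--         # Додаємо зашифрований блок до загального результату
--         encrypted_text += ''.join(matrix)
--
--     return encrypted_text
-- ===== SOURCE B (Python) =====
-- def encrypt_double_permutation(text, key1, key2):
--     rows, cols = len(key1), len(key2)
--     block_size = rows * cols
--     chunks = []
--     for start in range(0, len(text), block_size):
--         block = text[start:start + block_size].ljust(block_size)
--         out = [' '] * block_size
--         for r in range(rows):
--             for c in range(cols):
--                 out[(key1[r] - 1) * cols + (key2[c] - 1)] = block[r * cols + c]
--         chunks.append(''.join(out))
--     return ''.join(chunks)
-- ===== Notes on version B (the rewrite author's own statement) =====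
-- stated objective: simpler
-- what changed: B computes each output block with a single direct scatter out[(key1[r]-1)*cols + (key2[c]-1)] = block[r*cols+c], replacing A's build-matrix/transpose/permute/transpose/permute/join chain; Pre_ excludes non-permutation keys (values outside 1..len or duplicates, with nonempty text), a corner where the cipher is unspecified and A's and B's values are two equally defensible conventions (A wraps negative key values per matrix row and drops rows left empty by duplicate keys; B indexes the flat block), so neither value is the one to match.
-- outside the precondition, e.g. on encrypt_double_permutation('abcd', [2, 1], [0, 1]): A returns 'dcba', B returns 'dabc'; on encrypt_double_permutation('abcd', [1, 1], [1, 2]): A returns 'cd', B returns 'cd  '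
import Mathlib
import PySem

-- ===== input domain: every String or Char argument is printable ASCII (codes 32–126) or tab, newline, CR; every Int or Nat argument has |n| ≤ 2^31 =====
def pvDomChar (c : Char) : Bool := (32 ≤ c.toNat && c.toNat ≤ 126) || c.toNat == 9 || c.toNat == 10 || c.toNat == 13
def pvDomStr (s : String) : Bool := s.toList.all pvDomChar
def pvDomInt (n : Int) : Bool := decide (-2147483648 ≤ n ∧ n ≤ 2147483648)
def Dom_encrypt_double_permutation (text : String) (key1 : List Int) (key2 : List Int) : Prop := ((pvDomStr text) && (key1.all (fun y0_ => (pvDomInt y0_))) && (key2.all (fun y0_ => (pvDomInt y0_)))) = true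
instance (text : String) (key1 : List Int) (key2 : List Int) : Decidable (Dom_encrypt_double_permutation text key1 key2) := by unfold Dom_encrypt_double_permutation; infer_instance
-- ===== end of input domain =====

-- B replaces A's per-block build-matrix/transpose/permute/transpose/permute/join chain by one
-- direct scatter out[(key1[r]-1)*cols + (key2[c]-1)] = block[r*cols+c] (simpler, same cost).

-- ===== PORT A =====
-- zip(*matrix) followed by ''.join of each tuple: truncates at the shortest row, like Python's zip
def pvZipJoin (ls : List (List Char)) : List (List Char) :=
  if h : ls ≠ [] ∧ ls.all (fun r => !r.isEmpty) then
    (ls.map (fun r => r.headD ' ')) :: pvZipJoin (ls.map List.tail)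
  else []
termination_by (ls.headD []).length
decreasing_by
  obtain ⟨hne, hall⟩ := h
  cases ls with
  | nil => exact absurd rfl hne
  | cons r rest =>
    simp only [List.all_cons, Bool.and_eq_true, Bool.not_eq_true'] at hall
    cases r with
    | nil => simp at hall
    | cons a as => simp

def pvApplyPerm (matrix : List (List Char)) (key : List Int) : List (List Char) :=
  (PySem.List.enumerate key).foldl
    (fun acc p => PySem.List.pySetD acc (p.2 - 1) (PySem.List.pyGetD matrix p.1 []))
    (List.replicate matrix.length [])

def encrypt_double_permutation (text : String) (key1 : List Int) (key2 : List Int) : String :=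
  let rows : Int := key1.length
  let cols : Int := key2.length
  let block_size : Int := rows * cols
  let body := (PySem.List.pyRange 0 (text.toList.length) block_size).foldl
    (fun acc bs =>
      let block0 := PySem.List.slice text.toList (some bs) (some (bs + block_size))
      -- block.ljust(block_size): pad on the right with spaces
      let block := block0 ++ List.replicate (block_size.toNat - block0.length) ' '
      let matrix := (PySem.List.pyRange 0 (block.length) cols).foldl
        (fun m i => m ++ [PySem.List.slice block (some i) (some (i + cols))]) []
      let m1 := pvZipJoin matrix
      let m2 := pvApplyPerm m1 key2
      let m3 := pvZipJoin m2
      let m4 := pvApplyPerm m3 key1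
      acc ++ PySem.Chars.join [] m4) []
  String.ofList body

-- ===== PORT B =====
-- ''.join over a list of single characters is the character list itself, so each chunk is `out`.
def encrypt_double_permutation_alt (text : String) (key1 : List Int) (key2 : List Int) : String :=
  let rows : Int := key1.length
  let cols : Int := key2.length
  let block_size : Int := rows * cols
  let chunks := (PySem.List.pyRange 0 (text.toList.length) block_size).foldl
    (fun acc start =>
      let block0 := PySem.List.slice text.toList (some start) (some (start + block_size))
      let block := block0 ++ List.replicate (block_size.toNat - block0.length) ' '
      let out := (PySem.List.pyRange 0 rows 1).foldl
        (fun o r => (PySem.List.pyRange 0 cols 1).foldl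
          (fun o2 c => PySem.List.pySetD o2
            ((PySem.List.pyGetD key1 r 0 - 1) * cols + (PySem.List.pyGetD key2 c 0 - 1))
            (PySem.List.pyGetD block (r * cols + c) ' ')) o)
        (List.replicate block_size.toNat ' ')
      acc ++ [out]) []
  String.ofList (PySem.Chars.join [] chunks)

-- ===== PRECONDITION & SPEC =====
-- Empty keys make A raise ValueError (range step 0). With nonempty text, Pre_ excludes keys that
-- are not 1-based permutations (values outside 1..len, or duplicates): A raises IndexError on most
-- of them, and on the rest (zero/negative key values, duplicate key1 values) the cipher is
-- unspecified and A's and B's values are two equally defensible conventions (A wraps negative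
-- indices per row and drops rows left empty by duplicates; B indexes the flat block), so neither
-- value is the one to match.
def Pre_encrypt_double_permutation (text : String) (key1 : List Int) (key2 : List Int) : Prop :=
  key1 ≠ [] ∧ key2 ≠ [] ∧
  (text = "" ∨
    ((∀ k ∈ key1, 1 ≤ k ∧ k ≤ (key1.length : Int)) ∧ key1.Nodup ∧
     (∀ k ∈ key2, 1 ≤ k ∧ k ≤ (key2.length : Int)) ∧ key2.Nodup))
instance (text : String) (key1 : List Int) (key2 : List Int) : Decidable (Pre_encrypt_double_permutation text key1 key2) := by unfold Pre_encrypt_double_permutation; infer_instance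

def pvWitness_encrypt_double_permutation : String × List Int × List Int := ("hello!", [2, 1], [3, 1, 2])

def Spec_encrypt_double_permutation (text : String) (key1 : List Int) (key2 : List Int) (out : String) : Prop := out = encrypt_double_permutation_alt text key1 key2
instance (text : String) (key1 : List Int) (key2 : List Int) (out : String) : Decidable (Spec_encrypt_double_permutation text key1 key2 out) := by unfold Spec_encrypt_double_permutation; infer_instance

-- ===== CLAIM (what is proved, stated in full; the proofs are below) =====
def Claim_equal_encrypt_double_permutation : Prop := ∀ (text : String) (key1 : List Int) (key2 : List Int), Dom_encrypt_double_permutation text key1 key2 → Pre_encrypt_double_permutation text key1 key2 → Spec_encrypt_double_permutation text key1 key2 (encrypt_double_permutation text key1 key2)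

-- ===== LEMMAS AND PROOFS =====

-- Python's wrapped 0-based target index of a 1-based key value
def pvWrap (k : Int) (n : Nat) : Nat := (PySem.Int.mod (k - 1) (n : Int)).toNat

-- position of the LAST occurrence of j in w
def pvLast : List Nat → Nat → Option Nat
  | [], _ => none
  | x :: xs, j =>
    match pvLast xs j with
    | some t => some (t + 1)
    | none => if x = j then some 0 else none

-- the common closed form of one encrypted block
def pvGB (block : List Char) (key1 key2 : List Int) : List Char :=
  (List.range key1.length).flatMap (fun j =>
    match pvLast (key1.map (fun k => pvWrap k key1.length)) j with
    | none => []
    | some t => (List.range key2.length).map (fun c' =>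
        block.getD (key2.length * t
          + List.idxOf c' (key2.map (fun k => pvWrap k key2.length))) ' '))

theorem pvWrap_lt (k : Int) {n : Nat} (hn : 0 < n) : pvWrap k n < n := by
  have h1 := PySem.Int.mod_nonneg (k - 1) (b := (n : Int)) (by exact_mod_cast hn)
  have h2 := PySem.Int.mod_lt (k - 1) (b := (n : Int)) (by exact_mod_cast hn)
  simp only [pvWrap]
  omega

theorem pvWrap_perm {k : Int} {n : Nat} (h1 : 1 ≤ k) (h2 : k ≤ (n : Int)) :
    pvWrap k n = (k - 1).toNat := by
  have hn : (0 : Int) < (n : Int) := by omega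
  simp only [pvWrap]
  rw [PySem.Int.mod_eq_emod_of_pos hn, Int.emod_eq_of_lt (by omega) (by omega)]

theorem pvSetD_wrap {α : Type} (xs : List α) (v : α) (k : Int) (n : Nat) (hn : 0 < n)
    (hlen : xs.length = n) (h1 : 1 - (n : Int) ≤ k) (h2 : k ≤ (n : Int)) :
    PySem.List.pySetD xs (k - 1) v = xs.set (pvWrap k n) v := by
  have hmod : PySem.Int.mod (k - 1) (n : Int) = (k - 1) % (n : Int) :=
    PySem.Int.mod_eq_emod_of_pos (by exact_mod_cast hn)
  simp only [PySem.List.pySetD, PySem.List.pySet?, PySem.List.pyIdx?, hlen]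
  by_cases hpos : 0 ≤ k - 1
  · rw [if_pos hpos, if_pos (by omega : k - 1 < (n : Int))]
    simp only [Option.map_some, Option.getD_some]
    have hm : PySem.Int.mod (k - 1) (n : Int) = k - 1 := by
      rw [hmod]
      exact Int.emod_eq_of_lt hpos (by omega)
    rw [pvWrap, hm]
  · rw [if_neg hpos, if_pos (by omega : -(n : Int) ≤ k - 1)]
    simp only [Option.map_some, Option.getD_some]
    have hm : PySem.Int.mod (k - 1) (n : Int) = k - 1 + (n : Int) := by
      have h4 := (Int.add_mul_emod_self_left (a := k - 1) (b := (n : Int)) (c := 1)).symm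
      rw [mul_one] at h4
      rw [hmod, h4]
      exact Int.emod_eq_of_lt (by omega) (by omega)
    congr 1
    rw [pvWrap, hm]
    omega

theorem pvLast_lt {w : List Nat} {j t : Nat} (h : pvLast w j = some t) : t < w.length := by
  induction w generalizing t with
  | nil => simp [pvLast] at h
  | cons x xs ih =>
    simp only [pvLast] at h
    simp only [List.length_cons]
    cases hw : pvLast xs j with
    | some u =>
      rw [hw] at h
      simp only [Option.some.injEq] at h
      have := ih hw
      omega
    | none =>
      rw [hw] at h
      split_ifs at h with hx
      simp only [Option.some.injEq] at h
      omega

theorem pvLast_of_not_mem {w : List Nat} {j : Nat} (h : j ∉ w) : pvLast w j = none := by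
  induction w with
  | nil => rfl
  | cons x xs ih =>
    simp only [List.mem_cons, not_or] at h
    simp only [pvLast, ih h.2, if_neg (fun hh : x = j => h.1 hh.symm)]

theorem pvLast_eq_idxOf {w : List Nat} (hnd : w.Nodup) {j : Nat} (hj : j ∈ w) :
    pvLast w j = some (List.idxOf j w) := by
  induction w with
  | nil => simp at hj
  | cons x xs ih =>
    have hx := (List.nodup_cons.mp hnd).1
    by_cases hmem : j ∈ xs
    · have hne : x ≠ j := fun h => hx (h ▸ hmem)
      simp only [pvLast, ih (List.nodup_cons.mp hnd).2 hmem, List.idxOf_cons_ne _ hne]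
    · have hxj : x = j := by
        rcases List.mem_cons.mp hj with h | h
        · exact h.symm
        · exact absurd h hmem
      subst hxj
      simp [pvLast, pvLast_of_not_mem hmem, List.idxOf_cons_self]

-- fold of element writes preserves the length
theorem pvFoldlSet_len {α β : Type} (e1 : β → Int) (e2 : β → α) :
    ∀ (l : List β) (o : List α),
    (l.foldl (fun o2 c => PySem.List.pySetD o2 (e1 c) (e2 c)) o).length = o.length := by
  intro l
  induction l with
  | nil => intro o; rfl
  | cons x xs ih =>
    intro o
    rw [List.foldl_cons, ih, PySem.List.length_pySetD]

-- the generic overwrite-scatter loop of A's apply_permutation: last write to a slot wins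
theorem pvScatterLast {α : Type} (d : α) (g : Int → α) (n : Nat) (pos : Int → Int) :
    ∀ (key : List Int),
    (∀ k ∈ key, ∀ (xs : List α) (v : α), xs.length = n →
        PySem.List.pySetD xs (pos k) v = xs.set (pvWrap k n) v) →
    ∀ (s : Int) (acc : List α), acc.length = n → ∀ j, j < n →
    ((PySem.List.enumerate key s).foldl
        (fun a p => PySem.List.pySetD a (pos p.2) (g p.1)) acc).getD j d
    = (match pvLast (key.map (fun k => pvWrap k n)) j with
       | none => acc.getD j d
       | some t => g (s + (t : Int))) := by
  intro key
  induction key with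
  | nil => intro _ s acc _ j _; simp [PySem.List.enumerate, pvLast]
  | cons k ks ih =>
    intro hpos s acc hlen j hj
    rw [PySem.List.enumerate_cons, List.foldl_cons]
    have hset := hpos k List.mem_cons_self acc (g s) hlen
    rw [hset]
    have hlen' : (acc.set (pvWrap k n) (g s)).length = n := by simp [hlen]
    rw [ih (fun k' hk' => hpos k' (List.mem_cons_of_mem _ hk')) (s + 1) _ hlen' j hj]
    have hgetset : (acc.set (pvWrap k n) (g s)).getD j d
        = if pvWrap k n = j then g s else acc.getD j d := by
      rw [List.getD_eq_getElem _ _ (by simp [hlen, hj]), List.getElem_set]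
      split_ifs
      · rfl
      · exact (List.getD_eq_getElem _ _ (by omega)).symm
    simp only [List.map_cons, pvLast]
    cases hw : pvLast (ks.map (fun k => pvWrap k n)) j with
    | some t =>
      dsimp only
      congr 1
      push_cast
      ring
    | none =>
      dsimp only
      rw [hgetset]
      split_ifs
      · simp
      · rfl

-- a fold whose body appends a block to the accumulator is a flatMap
theorem pvFoldAppendGen {α β : Type} (body : List α → β → List α) (F : β → List α)
    (hbody : ∀ acc bs, body acc bs = acc ++ F bs) :
    ∀ (l : List β) (acc : List α), l.foldl body acc = acc ++ l.flatMap F := by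
  intro l
  induction l with
  | nil => intro acc; simp
  | cons x xs ih =>
    intro acc
    rw [List.foldl_cons, hbody, ih, List.flatMap_cons, List.append_assoc]

theorem pvFlattenFlatMap {α β : Type} (F : β → List (List α)) :
    ∀ (l : List β), (l.flatMap F).flatten = l.flatMap (fun x => (F x).flatten) := by
  intro l
  induction l with
  | nil => rfl
  | cons x xs ih => simp [List.flatMap_cons, List.flatten_append, ih]

theorem pvGetD_map_range {α : Type} (F : Nat → α) (d : α) {i n : Nat} (hi : i < n) :
    ((List.range n).map F).getD i d = F i := by
  rw [List.getD_eq_getElem _ _ (by simpa using hi)]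
  simp

theorem pvTail_getD {α : Type} (r : List α) (c : Nat) (d : α) :
    (List.tail r).getD c d = r.getD (c + 1) d := by
  cases r <;> simp [List.getD_eq_getElem?_getD]

theorem pvTakeDrop_getD (block : List Char) (a t c : Nat) (hc : c < t) :
    ((block.drop a).take t).getD c ' ' = block.getD (a + c) ' ' := by
  simp [List.getD_eq_getElem?_getD, hc, List.getElem?_drop]

-- zip(*matrix) (+ join) on a nonempty rectangular matrix
theorem pvZipJoin_rect : ∀ (m : Nat) (ls : List (List Char)), ls ≠ [] →
    (∀ r ∈ ls, r.length = m) →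
    pvZipJoin ls = (List.range m).map (fun c => ls.map (fun r => r.getD c ' '))
  | 0, ls, hne, hlen => by
    rw [pvZipJoin]
    rw [dif_neg]
    · simp
    · rintro ⟨-, hall⟩
      obtain ⟨r, hr⟩ := List.exists_mem_of_ne_nil ls hne
      have h1 := hlen r hr
      have h2 := List.all_eq_true.mp hall r hr
      rw [List.length_eq_zero_iff] at h1
      subst h1; simp at h2
  | (m + 1), ls, hne, hlen => by
    have hall : ls.all (fun r => !r.isEmpty) = true := by
      refine List.all_eq_true.mpr fun r hr => ?_
      have := hlen r hr
      cases r with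
      | nil => simp at this
      | cons a as => simp
    rw [pvZipJoin, dif_pos ⟨hne, hall⟩]
    have hne' : ls.map List.tail ≠ [] := by simpa using hne
    have hlen' : ∀ r ∈ ls.map List.tail, r.length = m := by
      rintro r hr
      obtain ⟨q, hq, rfl⟩ := List.mem_map.mp hr
      have := hlen q hq
      simp [List.length_tail, this]
    rw [pvZipJoin_rect m _ hne' hlen']
    rw [List.range_succ_eq_map]
    simp only [List.map_cons, List.map_map]
    congr 1
    · refine List.map_congr_left fun r hr => ?_
      cases r <;> rfl
    · refine List.map_congr_left fun c hc => ?_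
      simp only [Function.comp_apply]
      refine List.map_congr_left fun r hr => ?_
      simp only [Function.comp_apply, Nat.succ_eq_add_one]
      rw [pvTail_getD]

-- ''.join with an empty separator is flatten
theorem pvJoinNil_flatten (ls : List (List Char)) : PySem.Chars.join [] ls = ls.flatten := by
  induction ls with
  | nil => simp [PySem.Chars.join_nil]
  | cons p rest ih =>
    cases rest with
    | nil => simp [PySem.Chars.join_singleton]
    | cons q rs =>
      rw [PySem.Chars.join_cons_cons]
      simp only [List.flatten_cons] at ih ⊢
      rw [ih]
      simp

-- range(0, R*C, C) = [C*r for r in range(R)]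
theorem pvRangeMul (R C : Nat) (hR : 0 < R) (hC : 0 < C) :
    PySem.List.pyRange 0 ((R * C : Nat) : Int) (C : Int) =
      (List.range R).map (fun r => ((C * r : Nat) : Int)) := by
  rw [PySem.List.pyRange_of_pos _ _ (by exact_mod_cast hC)]
  have hpos : (0 : Int) < ((R * C : Nat) : Int) := by
    have : 0 < R * C := Nat.mul_pos hR hC
    exact_mod_cast this
  rw [if_pos hpos]
  have hcount : ((((R * C : Nat) : Int) - 0 + (C : Int) - 1) / (C : Int)).toNat = R := by
    have h1 : (((R * C : Nat) : Int) - 0 + (C : Int) - 1) = ((R * C + C - 1 : Nat) : Int) := by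
      push_cast
      omega
    have h2 : (R * C + C - 1) / C = R := by
      rw [show R * C + C - 1 = C * R + (C - 1) by rw [mul_comm]; omega,
        Nat.mul_add_div hC, Nat.div_eq_of_lt (by omega), Nat.add_zero]
    have h3 : ((R * C + C - 1 : Nat) : Int) / (C : Int) = (((R * C + C - 1) / C : Nat) : Int) := by
      push_cast
      ring
    rw [h1, h3, h2]
    simp
  rw [hcount]
  refine List.map_congr_left fun k hk => ?_
  push_cast
  ring

-- the wrapped targets of a permutation key are pairwise distinct
theorem pvWraps_nodup (key : List Int)
    (hb : ∀ k ∈ key, 1 ≤ k ∧ k ≤ (key.length : Int)) (hnd : key.Nodup) :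
    (key.map (fun k => pvWrap k key.length)).Nodup := by
  refine List.Nodup.map_on ?_ hnd
  intro x hx y hy hxy
  rw [pvWrap_perm (hb x hx).1 (hb x hx).2, pvWrap_perm (hb y hy).1 (hb y hy).2] at hxy
  have h1 := (hb x hx).1
  have h2 := (hb y hy).1
  omega

-- a Nodup wrap list of full length hits every slot
theorem pvW2_surj (key2 : List Int) (hC : 0 < key2.length)
    (hnd : (key2.map (fun k => pvWrap k key2.length)).Nodup) :
    ∀ j < key2.length, j ∈ key2.map (fun k => pvWrap k key2.length) := by
  intro j hj
  set w2 := key2.map (fun k => pvWrap k key2.length) with hw2def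
  have hlenw : w2.length = key2.length := by simp [hw2def]
  have hsub : w2.toFinset ⊆ Finset.range key2.length := by
    intro a ha
    rw [List.mem_toFinset] at ha
    rw [hw2def] at ha
    obtain ⟨k, -, rfl⟩ := List.mem_map.mp ha
    exact Finset.mem_range.mpr (pvWrap_lt k hC)
  have hcard : (Finset.range key2.length).card ≤ w2.toFinset.card := by
    rw [List.toFinset_card_of_nodup hnd, hlenw, Finset.card_range]
  have heq : w2.toFinset = Finset.range key2.length :=
    Finset.eq_of_subset_of_card_le hsub hcard
  rw [← List.mem_toFinset, heq]
  exact Finset.mem_range.mpr hj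

-- closed form of A's per-block matrix chain
theorem pvABlockEq (key1 key2 : List Int) (block : List Char)
    (hne1 : key1 ≠ []) (hne2 : key2 ≠ [])
    (hb1 : ∀ k ∈ key1, 1 - (key1.length : Int) ≤ k ∧ k ≤ (key1.length : Int))
    (hb2 : ∀ k ∈ key2, 1 - (key2.length : Int) ≤ k ∧ k ≤ (key2.length : Int))
    (hw2' : (key2.map (fun k => pvWrap k key2.length)).Nodup)
    (hb : block.length = key1.length * key2.length) :
    PySem.Chars.join []
      (pvApplyPerm (pvZipJoin (pvApplyPerm (pvZipJoin
        ((PySem.List.pyRange 0 (block.length : Int) (key2.length : Int)).foldl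
          (fun m i => m ++ [PySem.List.slice block (some i) (some (i + (key2.length : Int)))]) []))
        key2)) key1)
    = pvGB block key1 key2 := by
  have hR : 0 < key1.length := List.length_pos_iff.mpr hne1
  have hC : 0 < key2.length := List.length_pos_iff.mpr hne2
  have hsurj := pvW2_surj key2 hC hw2'
  have hw2len : (key2.map (fun k => pvWrap k key2.length)).length = key2.length := by simp
  -- step 1: the matrix of rows of the block
  have hmx : ((PySem.List.pyRange 0 (block.length : Int) (key2.length : Int)).foldl
      (fun m i => m ++ [PySem.List.slice block (some i) (some (i + (key2.length : Int)))]) [])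
      = (List.range key1.length).map
          (fun r => (block.drop (key2.length * r)).take key2.length) := by
    rw [hb, pvRangeMul key1.length key2.length hR hC, List.foldl_map,
      PySem.List.foldl_append_singleton_eq_map, List.nil_append]
    refine List.map_congr_left fun r hr => ?_
    rw [PySem.List.slice_natCast_add]
  have hmxlen : ∀ row ∈ (List.range key1.length).map
      (fun r => (block.drop (key2.length * r)).take key2.length),
      row.length = key2.length := by
    rintro row hrow
    obtain ⟨r, hr, rfl⟩ := List.mem_map.mp hrow
    have hrR := List.mem_range.mp hr
    have hmul : key2.length * (r + 1) ≤ key2.length * key1.length :=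
      Nat.mul_le_mul_left key2.length hrR
    have hexp : key2.length * (r + 1) = key2.length * r + key2.length := by ring
    have hexp2 : key1.length * key2.length = key2.length * key1.length := by ring
    simp only [List.length_take, List.length_drop, hb]
    omega
  -- step 2: first transpose
  have hm1 : pvZipJoin ((List.range key1.length).map
        fun r => (block.drop (key2.length * r)).take key2.length)
      = (List.range key2.length).map (fun c => (List.range key1.length).map
          (fun r => block.getD (key2.length * r + c) ' ')) := by
    rw [pvZipJoin_rect key2.length _ (by simpa using hR.ne') hmxlen]
    refine List.map_congr_left fun c hc => ?_
    rw [List.map_map]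
    refine List.map_congr_left fun r hr => ?_
    exact pvTakeDrop_getD block (key2.length * r) key2.length c (List.mem_range.mp hc)
  -- step 3: first permutation (columns, injective wrap)
  have hm2 : pvApplyPerm ((List.range key2.length).map (fun c => (List.range key1.length).map
        (fun r => block.getD (key2.length * r + c) ' '))) key2
      = (List.range key2.length).map (fun c' => (List.range key1.length).map
          (fun r => block.getD (key2.length * r
            + List.idxOf c' (key2.map (fun k => pvWrap k key2.length))) ' ')) := by
    have hlen : (pvApplyPerm ((List.range key2.length).map (fun c => (List.range key1.length).map
        (fun r => block.getD (key2.length * r + c) ' '))) key2).length = key2.length := by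
      unfold pvApplyPerm
      rw [pvFoldlSet_len]
      simp
    refine List.ext_getElem (by rw [hlen]; simp) ?_
    intro j h1 h2
    have hjC : j < key2.length := by simpa using h2
    have hsc := pvScatterLast ([] : List Char)
      (fun i => PySem.List.pyGetD ((List.range key2.length).map
        (fun c => (List.range key1.length).map
          (fun r => block.getD (key2.length * r + c) ' '))) i [])
      key2.length (fun k => k - 1) key2
      (fun k hk xs v hxs => pvSetD_wrap xs v k key2.length hC hxs (hb2 k hk).1 (hb2 k hk).2)
      0 (List.replicate ((List.range key2.length).map (fun c => (List.range key1.length).map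
          (fun r => block.getD (key2.length * r + c) ' '))).length []) (by simp) j hjC
    rw [pvLast_eq_idxOf hw2' (hsurj j hjC)] at hsc
    dsimp only at hsc
    have hidx : List.idxOf j (key2.map (fun k => pvWrap k key2.length)) < key2.length := by
      have := List.idxOf_lt_length_of_mem (hsurj j hjC)
      omega
    rw [zero_add, PySem.List.pyGetD_natCast, pvGetD_map_range _ _ hidx] at hsc
    rw [← List.getD_eq_getElem _ [] h1]
    refine hsc.trans ?_
    simp
  -- step 4: second transpose
  have hm3 : pvZipJoin ((List.range key2.length).map (fun c' => (List.range key1.length).map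
        (fun r => block.getD (key2.length * r
          + List.idxOf c' (key2.map (fun k => pvWrap k key2.length))) ' ')))
      = (List.range key1.length).map (fun i => (List.range key2.length).map
          (fun c' => block.getD (key2.length * i
            + List.idxOf c' (key2.map (fun k => pvWrap k key2.length))) ' ')) := by
    rw [pvZipJoin_rect key1.length _ (by simpa using hC.ne') (by
      rintro row hrow
      obtain ⟨c', hc', rfl⟩ := List.mem_map.mp hrow
      simp)]
    refine List.map_congr_left fun i hi => ?_
    rw [List.map_map]
    refine List.map_congr_left fun c' hc' => ?_
    simp only [Function.comp_apply]
    rw [pvGetD_map_range _ _ (List.mem_range.mp hi)]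
  -- step 5: second permutation (rows, last write wins)
  have hm4 : pvApplyPerm ((List.range key1.length).map (fun i => (List.range key2.length).map
        (fun c' => block.getD (key2.length * i
          + List.idxOf c' (key2.map (fun k => pvWrap k key2.length))) ' ')))
        key1
      = (List.range key1.length).map (fun j =>
          match pvLast (key1.map (fun k => pvWrap k key1.length)) j with
          | none => []
          | some t => (List.range key2.length).map (fun c' =>
              block.getD (key2.length * t
                + List.idxOf c' (key2.map (fun k => pvWrap k key2.length))) ' ')) := by
    have hlen : (pvApplyPerm ((List.range key1.length).map (fun i => (List.range key2.length).map
        (fun c' => block.getD (key2.length * i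
          + List.idxOf c' (key2.map (fun k => pvWrap k key2.length))) ' '))) key1).length
        = key1.length := by
      unfold pvApplyPerm
      rw [pvFoldlSet_len]
      simp
    refine List.ext_getElem (by rw [hlen]; simp) ?_
    intro j h1 h2
    have hjR : j < key1.length := by simpa using h2
    have hsc := pvScatterLast ([] : List Char)
      (fun i => PySem.List.pyGetD ((List.range key1.length).map
        (fun i => (List.range key2.length).map
          (fun c' => block.getD (key2.length * i
            + List.idxOf c' (key2.map (fun k => pvWrap k key2.length))) ' '))) i [])
      key1.length (fun k => k - 1) key1
      (fun k hk xs v hxs => pvSetD_wrap xs v k key1.length hR hxs (hb1 k hk).1 (hb1 k hk).2)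
      0 (List.replicate ((List.range key1.length).map (fun i => (List.range key2.length).map
          (fun c' => block.getD (key2.length * i
            + List.idxOf c' (key2.map (fun k => pvWrap k key2.length))) ' '))).length [])
      (by simp) j hjR
    rw [← List.getD_eq_getElem _ [] h1]
    have hr : ((List.range key1.length).map (fun j =>
        match pvLast (key1.map (fun k => pvWrap k key1.length)) j with
        | none => ([] : List Char)
        | some t => (List.range key2.length).map (fun c' =>
            block.getD (key2.length * t
              + List.idxOf c' (key2.map (fun k => pvWrap k key2.length))) ' ')))[j]'h2
        = match pvLast (key1.map (fun k => pvWrap k key1.length)) j with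
          | none => ([] : List Char)
          | some t => (List.range key2.length).map (fun c' =>
              block.getD (key2.length * t
                + List.idxOf c' (key2.map (fun k => pvWrap k key2.length))) ' ') := by
      simp
    rw [hr]
    cases hw : pvLast (key1.map (fun k => pvWrap k key1.length)) j with
    | none =>
      rw [hw] at hsc
      dsimp only at hsc
      refine hsc.trans ?_
      simp [hjR]
    | some t =>
      rw [hw] at hsc
      dsimp only at hsc
      have htR : t < key1.length := by
        have := pvLast_lt hw
        simpa using this
      rw [zero_add, PySem.List.pyGetD_natCast, pvGetD_map_range _ _ htR] at hsc
      exact hsc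
  rw [hmx, hm1, hm2, hm3, hm4, pvJoinNil_flatten, ← List.flatMap_def]
  rfl

-- ===== B-side lemmas =====

theorem pvKeyAtIdx (key : List Int) (n : Nat)
    (hb : ∀ k ∈ key, 1 ≤ k ∧ k ≤ (n : Int)) (j : Nat)
    (hmem : j ∈ key.map (fun k => pvWrap k n)) :
    key.getD (List.idxOf j (key.map (fun k => pvWrap k n))) 0 = (j : Int) + 1 := by
  have ht : List.idxOf j (key.map (fun k => pvWrap k n))
      < (key.map (fun k => pvWrap k n)).length := List.idxOf_lt_length_of_mem hmem
  have htk : List.idxOf j (key.map (fun k => pvWrap k n)) < key.length := by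
    simpa using ht
  have hwel : (key.map (fun k => pvWrap k n))[List.idxOf j (key.map (fun k => pvWrap k n))]'ht
      = j := List.getElem_idxOf ht
  rw [List.getElem_map] at hwel
  have hkmem : key[List.idxOf j (key.map (fun k => pvWrap k n))]'htk ∈ key := List.getElem_mem htk
  have hbk := hb _ hkmem
  rw [pvWrap_perm hbk.1 hbk.2] at hwel
  rw [List.getD_eq_getElem _ _ htk]
  omega

-- nested fold over two ranges is a fold over the list of pairs
theorem pvFoldlNest {α β γ : Type} (f : α → β → γ → α) :
    ∀ (L1 : List β) (L2 : List γ) (init : α),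
    L1.foldl (fun o r => L2.foldl (fun o2 c => f o2 r c) o) init
    = (L1.flatMap (fun r => L2.map (fun c => (r, c)))).foldl (fun o p => f o p.1 p.2) init := by
  intro L1
  induction L1 with
  | nil => intro L2 init; simp
  | cons x xs ih =>
    intro L2 init
    rw [List.foldl_cons, List.flatMap_cons, List.foldl_append, List.foldl_map, ih]

theorem pvSetFold_len {α : Type} :
    ∀ (ps : List (Nat × α)) (init : List α),
    (ps.foldl (fun o q => o.set q.1 q.2) init).length = init.length := by
  intro ps
  induction ps with
  | nil => intro init; rfl
  | cons q qs ih => intro init; rw [List.foldl_cons, ih, List.length_set]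

theorem pvSetFold_not_mem {α : Type} (d : α) :
    ∀ (ps : List (Nat × α)) (init : List α) (p : Nat), p ∉ ps.map Prod.fst →
    (ps.foldl (fun o q => o.set q.1 q.2) init).getD p d = init.getD p d := by
  intro ps
  induction ps with
  | nil => intro init p _; rfl
  | cons q qs ih =>
    intro init p hp
    simp only [List.map_cons, List.mem_cons, not_or] at hp
    rw [List.foldl_cons, ih _ _ hp.2]
    simp [List.getD_eq_getElem?_getD, List.getElem?_set_ne (fun h => hp.1 h.symm)]

theorem pvSetFold_mem {α : Type} (d : α) :
    ∀ (ps : List (Nat × α)) (init : List α) (p : Nat) (v : α),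
    (ps.map Prod.fst).Nodup → (p, v) ∈ ps → p < init.length →
    (ps.foldl (fun o q => o.set q.1 q.2) init).getD p d = v := by
  intro ps
  induction ps with
  | nil => intro init p v _ hmem _; simp at hmem
  | cons q qs ih =>
    intro init p v hnd hmem hp
    rw [List.map_cons, List.nodup_cons] at hnd
    rw [List.foldl_cons]
    rcases List.mem_cons.mp hmem with heq | hmem'
    · have hq1 : q.1 = p := by rw [← heq]
      have hnp : p ∉ qs.map Prod.fst := hq1 ▸ hnd.1
      rw [pvSetFold_not_mem d qs _ p hnp, ← heq]
      rw [List.getD_eq_getElem _ _ (by simpa using hp)]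
      rw [List.getElem_set]
      simp
    · exact ih _ p v hnd.2 hmem' (by simpa using hp)

-- unique decomposition p = x*C + y with y < C
theorem pvGridInj {C : Nat} (hC : 0 < C) {x y x' y' : Nat} (hy : y < C) (hy' : y' < C)
    (h : x * C + y = x' * C + y') : x = x' ∧ y = y' := by
  have hx : x = x' := by
    have e1 : (x * C + y) / C = x := by
      rw [mul_comm, Nat.mul_add_div hC, Nat.div_eq_of_lt hy, Nat.add_zero]
    have e2 : (x' * C + y') / C = x' := by
      rw [mul_comm, Nat.mul_add_div hC, Nat.div_eq_of_lt hy', Nat.add_zero]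
    rw [← e1, ← e2, h]
  subst hx
  omega

-- a list of length R*C is the concatenation of its R rows of length C
theorem pvRowsDecomp (C : Nat) :
    ∀ (R : Nat) (l : List Char), l.length = R * C →
    l = (List.range R).flatMap (fun j => (List.range C).map (fun c => l.getD (j * C + c) ' ')) := by
  intro R
  induction R with
  | zero =>
    intro l hl
    rw [Nat.zero_mul] at hl
    rw [List.length_eq_zero_iff.mp hl]
    simp
  | succ R ih =>
    intro l hl
    have hCle : C ≤ l.length := by rw [hl]; nlinarith [Nat.le_add_left C (R * C)]
    have hrow0 : (List.range C).map (fun c => l.getD (0 * C + c) ' ') = l.take C := by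
      refine List.ext_getElem (by simp [hCle]) ?_
      intro i h1 h2
      have hiC : i < C := by simpa using h1
      rw [List.getElem_map, List.getElem_range, List.getElem_take]
      rw [List.getD_eq_getElem _ _ (by omega)]
      simp
    have hdrop : l.drop C = (List.range R).flatMap
        (fun j => (List.range C).map (fun c => (l.drop C).getD (j * C + c) ' ')) := by
      refine ih (l.drop C) ?_
      rw [List.length_drop, hl]
      ring_nf
      omega
    have hshift : ∀ j ∈ List.range R,
        (List.range C).map (fun c => (l.drop C).getD (j * C + c) ' ')
        = (List.range C).map (fun c => l.getD ((j + 1) * C + c) ' ') := by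
      intro j hj
      refine List.map_congr_left fun c hc => ?_
      rw [List.getD_eq_getElem?_getD, List.getElem?_drop, ← List.getD_eq_getElem?_getD]
      congr 1
      ring
    rw [List.range_succ_eq_map, List.flatMap_cons, List.flatMap_map]
    have hrest : (List.range R).flatMap
        (fun a => (List.range C).map (fun c => l.getD (Nat.succ a * C + c) ' '))
        = (List.range R).flatMap
          (fun j => (List.range C).map (fun c => (l.drop C).getD (j * C + c) ' ')) := by
      rw [List.flatMap_def, List.flatMap_def]
      refine congrArg List.flatten (List.map_congr_left fun j hj => ?_)
      simp only [Nat.succ_eq_add_one]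
      exact (hshift j hj).symm
    rw [hrest, ← hdrop, hrow0, List.take_append_drop]

-- the flattened position B writes for row r, column c of the block
def pvPos (key1 key2 : List Int) (r c : Nat) : Nat :=
  ((key1.getD r 0 - 1) * (key2.length : Int) + (key2.getD c 0 - 1)).toNat

-- closed form of B's per-block scatter
theorem pvBBlockEq (key1 key2 : List Int) (block : List Char)
    (hb1 : ∀ k ∈ key1, 1 ≤ k ∧ k ≤ (key1.length : Int)) (hnd1 : key1.Nodup)
    (hb2 : ∀ k ∈ key2, 1 ≤ k ∧ k ≤ (key2.length : Int)) (hnd2 : key2.Nodup)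
    (hR : 0 < key1.length) (hC : 0 < key2.length) :
    (PySem.List.pyRange 0 (key1.length : Int) 1).foldl
      (fun o r => (PySem.List.pyRange 0 (key2.length : Int) 1).foldl
        (fun o2 c => PySem.List.pySetD o2
          ((PySem.List.pyGetD key1 r 0 - 1) * (key2.length : Int)
            + (PySem.List.pyGetD key2 c 0 - 1))
          (PySem.List.pyGetD block (r * (key2.length : Int) + c) ' ')) o)
      (List.replicate ((key1.length : Int) * (key2.length : Int)).toNat ' ')
    = pvGB block key1 key2 := by
  have hw1' := pvWraps_nodup key1 hb1 hnd1
  have hw2' := pvWraps_nodup key2 hb2 hnd2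
  have hsurj1 := pvW2_surj key1 hR hw1'
  have hsurj2 := pvW2_surj key2 hC hw2'
  have hbsN : ((key1.length : Int) * (key2.length : Int)).toNat
      = key1.length * key2.length := by
    have : ((key1.length : Int) * (key2.length : Int))
        = ((key1.length * key2.length : Nat) : Int) := by push_cast; ring
    rw [this, Int.toNat_natCast]
  -- bounds for the key entries at positions r < R, c < C
  have hbnd1 : ∀ r < key1.length, 1 ≤ key1.getD r 0 ∧ key1.getD r 0 ≤ (key1.length : Int) := by
    intro r hr
    rw [List.getD_eq_getElem _ _ hr]
    exact hb1 _ (List.getElem_mem hr)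
  have hbnd2 : ∀ c < key2.length, 1 ≤ key2.getD c 0 ∧ key2.getD c 0 ≤ (key2.length : Int) := by
    intro c hc
    rw [List.getD_eq_getElem _ _ hc]
    exact hb2 _ (List.getElem_mem hc)
  -- rewrite the two ranges to Nat ranges and uncurry the nested fold
  rw [PySem.List.pyRange_zero_nat key1.length]
  simp only [PySem.List.pyRange_zero_nat key2.length]
  rw [List.foldl_map]
  simp only [List.foldl_map]
  rw [pvFoldlNest]
  -- each write is a plain List.set at pvPos with the block character
  rw [PySem.List.foldl_congr_mem _ _
    (fun o p => o.set (pvPos key1 key2 p.1 p.2) (block.getD (p.1 * key2.length + p.2) ' ')) _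
    (by
      intro acc p hp
      obtain ⟨r, hr, c, hc, rfl⟩ : ∃ r, r ∈ List.range key1.length ∧ ∃ c,
          c ∈ List.range key2.length ∧ (r, c) = p := by
        rcases List.mem_flatMap.mp hp with ⟨r, hr, hpr⟩
        rcases List.mem_map.mp hpr with ⟨c, hc, hpc⟩
        exact ⟨r, hr, c, hc, hpc⟩
      have hrR := List.mem_range.mp hr
      have hcC := List.mem_range.mp hc
      have h1 := hbnd1 r hrR
      have h2 := hbnd2 c hcC
      have hcast : ((r : Int) * (key2.length : Int) + (c : Int))
          = ((r * key2.length + c : Nat) : Int) := by push_cast; ring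
      rw [PySem.List.pyGetD_natCast, PySem.List.pyGetD_natCast, hcast,
        PySem.List.pyGetD_natCast,
        PySem.List.pySetD_of_nonneg _ _ (by nlinarith [h1.1, h2.1])]
      rfl)]
  -- move the position/value computation into a map, exposing a plain set-fold over pairs
  rw [show ((List.range key1.length).flatMap
        (fun r => (List.range key2.length).map (fun c => (r, c)))).foldl
      (fun o p => o.set (pvPos key1 key2 p.1 p.2) (block.getD (p.1 * key2.length + p.2) ' '))
      (List.replicate ((key1.length : Int) * (key2.length : Int)).toNat ' ')
      = (((List.range key1.length).flatMap
          (fun r => (List.range key2.length).map (fun c => (r, c)))).map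
         (fun p => (pvPos key1 key2 p.1 p.2, block.getD (p.1 * key2.length + p.2) ' '))).foldl
        (fun o q => o.set q.1 q.2)
        (List.replicate ((key1.length : Int) * (key2.length : Int)).toNat ' ')
      from by rw [List.foldl_map]]
  set L := (List.range key1.length).flatMap
      (fun r => (List.range key2.length).map (fun c => (r, c))) with hL
  set ps := L.map (fun p => (pvPos key1 key2 p.1 p.2, block.getD (p.1 * key2.length + p.2) ' '))
      with hps
  have hmemL : ∀ p : Nat × Nat, p ∈ L ↔ p.1 < key1.length ∧ p.2 < key2.length := by
    intro p
    rw [hL]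
    constructor
    · intro hp
      rcases List.mem_flatMap.mp hp with ⟨r, hr, hpr⟩
      rcases List.mem_map.mp hpr with ⟨c, hc, hpc⟩
      rw [← hpc]
      exact ⟨List.mem_range.mp hr, List.mem_range.mp hc⟩
    · intro ⟨h1, h2⟩
      exact List.mem_flatMap.mpr ⟨p.1, List.mem_range.mpr h1,
        List.mem_map.mpr ⟨p.2, List.mem_range.mpr h2, by simp⟩⟩
  -- compute pvPos through the key bounds
  have hposval : ∀ p : Nat × Nat, p.1 < key1.length → p.2 < key2.length →
      (pvPos key1 key2 p.1 p.2 : Int)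
        = (key1.getD p.1 0 - 1) * (key2.length : Int) + (key2.getD p.2 0 - 1) := by
    intro p h1 h2
    have hb1' := hbnd1 p.1 h1
    have hb2' := hbnd2 p.2 h2
    rw [pvPos, Int.toNat_of_nonneg (by nlinarith [hb1'.1, hb2'.1])]
  -- the written positions are pairwise distinct
  have hndpos : (ps.map Prod.fst).Nodup := by
    rw [hps, List.map_map]
    have hLnd : L.Nodup := List.Nodup.product List.nodup_range List.nodup_range
    refine List.Nodup.map_on ?_ hLnd
    intro p hp q hq hpq
    have hpb := (hmemL p).mp hp
    have hqb := (hmemL q).mp hq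
    simp only [Function.comp_apply] at hpq
    have hpi : (pvPos key1 key2 p.1 p.2 : Int) = (pvPos key1 key2 q.1 q.2 : Int) := by
      exact_mod_cast congrArg (fun n : Nat => (n : Int)) hpq
    rw [hposval p hpb.1 hpb.2, hposval q hqb.1 hqb.2] at hpi
    have hb1p := hbnd1 p.1 hpb.1
    have hb1q := hbnd1 q.1 hqb.1
    have hb2p := hbnd2 p.2 hpb.2
    have hb2q := hbnd2 q.2 hqb.2
    -- recover a Nat grid equation and use unique decomposition
    have hgrid : (key1.getD p.1 0 - 1).toNat * key2.length + (key2.getD p.2 0 - 1).toNat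
        = (key1.getD q.1 0 - 1).toNat * key2.length + (key2.getD q.2 0 - 1).toNat := by
      have e1 : ((key1.getD p.1 0 - 1).toNat : Int) = key1.getD p.1 0 - 1 :=
        Int.toNat_of_nonneg (by omega)
      have e2 : ((key2.getD p.2 0 - 1).toNat : Int) = key2.getD p.2 0 - 1 :=
        Int.toNat_of_nonneg (by omega)
      have e3 : ((key1.getD q.1 0 - 1).toNat : Int) = key1.getD q.1 0 - 1 :=
        Int.toNat_of_nonneg (by omega)
      have e4 : ((key2.getD q.2 0 - 1).toNat : Int) = key2.getD q.2 0 - 1 :=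
        Int.toNat_of_nonneg (by omega)
      have : (((key1.getD p.1 0 - 1).toNat * key2.length
          + (key2.getD p.2 0 - 1).toNat : Nat) : Int)
          = (((key1.getD q.1 0 - 1).toNat * key2.length
          + (key2.getD q.2 0 - 1).toNat : Nat) : Int) := by
        push_cast [e1, e2, e3, e4]
        exact hpi
      exact_mod_cast this
    have hy : (key2.getD p.2 0 - 1).toNat < key2.length := by
      have := hb2p.2; omega
    have hy' : (key2.getD q.2 0 - 1).toNat < key2.length := by
      have := hb2q.2; omega
    obtain ⟨hx, hyy⟩ := pvGridInj hC hy hy' hgrid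
    have hk1 : key1.getD p.1 0 = key1.getD q.1 0 := by omega
    have hk2 : key2.getD p.2 0 = key2.getD q.2 0 := by omega
    have hp1 : p.1 = q.1 := by
      rw [List.getD_eq_getElem _ _ hpb.1, List.getD_eq_getElem _ _ hqb.1] at hk1
      exact (List.Nodup.getElem_inj_iff hnd1).mp hk1
    have hp2 : p.2 = q.2 := by
      rw [List.getD_eq_getElem _ _ hpb.2, List.getD_eq_getElem _ _ hqb.2] at hk2
      exact (List.Nodup.getElem_inj_iff hnd2).mp hk2
    exact Prod.ext hp1 hp2
  -- the result, entry by entry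
  have hlenres : (ps.foldl (fun o q => o.set q.1 q.2)
      (List.replicate ((key1.length : Int) * (key2.length : Int)).toNat ' ')).length
      = key1.length * key2.length := by
    rw [pvSetFold_len, List.length_replicate, hbsN]
  rw [pvRowsDecomp key2.length key1.length _ hlenres]
  -- compare with pvGB row by row
  rw [pvGB, List.flatMap_def, List.flatMap_def]
  refine congrArg List.flatten (List.map_congr_left fun j hj => ?_)
  have hjR := List.mem_range.mp hj
  rw [pvLast_eq_idxOf hw1' (hsurj1 j hjR)]
  dsimp only
  refine List.map_congr_left fun c' hc' => ?_
  have hcC := List.mem_range.mp hc'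
  -- the source cell (t, s) that writes output cell (j, c')
  set t := List.idxOf j (key1.map (fun k => pvWrap k key1.length)) with hts
  set s := List.idxOf c' (key2.map (fun k => pvWrap k key2.length)) with hss
  have htR : t < key1.length := by
    have := List.idxOf_lt_length_of_mem (hsurj1 j hjR)
    simpa using this
  have hsC : s < key2.length := by
    have := List.idxOf_lt_length_of_mem (hsurj2 c' hcC)
    simpa using this
  have hkey1t : key1.getD t 0 = (j : Int) + 1 := pvKeyAtIdx key1 key1.length hb1 j (hsurj1 j hjR)
  have hkey2s : key2.getD s 0 = (c' : Int) + 1 := pvKeyAtIdx key2 key2.length hb2 c' (hsurj2 c' hcC)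
  have hpos_ts : pvPos key1 key2 t s = j * key2.length + c' := by
    have : (pvPos key1 key2 t s : Int) = (j : Int) * (key2.length : Int) + (c' : Int) := by
      rw [hposval (t, s) htR hsC]
      dsimp only
      rw [hkey1t, hkey2s]
      ring
    have hcast : ((j * key2.length + c' : Nat) : Int)
        = (j : Int) * (key2.length : Int) + (c' : Int) := by push_cast; ring
    omega
  have hmem_ts : (j * key2.length + c', block.getD (t * key2.length + s) ' ') ∈ ps := by
    rw [hps]
    refine List.mem_map.mpr ⟨(t, s), (hmemL (t, s)).mpr ⟨htR, hsC⟩, ?_⟩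
    dsimp only
    rw [hpos_ts]
  rw [pvSetFold_mem ' ' ps _ _ _ hndpos hmem_ts
    (by rw [List.length_replicate, hbsN]; calc
      j * key2.length + c' < j * key2.length + key2.length := by omega
      _ = (j + 1) * key2.length := by ring
      _ ≤ key1.length * key2.length := Nat.mul_le_mul_right _ (by omega))]
  rw [mul_comm key2.length t]

-- ===== VERDICT (by name: the statement is the Claim_ definition above) =====
theorem encrypt_double_permutation_spec : Claim_equal_encrypt_double_permutation := by
  intro text key1 key2 _hdom hpre
  obtain ⟨hne1, hne2, hrest⟩ := hpre
  have hR : 0 < key1.length := List.length_pos_iff.mpr hne1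
  have hC : 0 < key2.length := List.length_pos_iff.mpr hne2
  have hpos : (0 : Int) < (key1.length : Int) * (key2.length : Int) := by
    have : 0 < key1.length * key2.length := Nat.mul_pos hR hC
    exact_mod_cast this
  unfold Spec_encrypt_double_permutation
  simp only [encrypt_double_permutation, encrypt_double_permutation_alt]
  rcases hrest with htext | ⟨hb1, hnd1, hb2, hnd2⟩
  · -- empty text: both loops run zero times
    have h0 : text.toList.length = 0 := by rw [htext]; rfl
    have hre : PySem.List.pyRange 0 ((text.toList.length : Nat) : Int)
        ((key1.length : Int) * (key2.length : Int)) = [] := by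
      rw [PySem.List.pyRange_of_pos _ _ hpos, if_neg (by rw [h0]; omega)]
      rfl
    rw [hre]
    rfl
  · have hb1' : ∀ k ∈ key1, 1 - (key1.length : Int) ≤ k ∧ k ≤ (key1.length : Int) := by
      intro k hk
      have := hb1 k hk
      omega
    have hb2' : ∀ k ∈ key2, 1 - (key2.length : Int) ≤ k ∧ k ≤ (key2.length : Int) := by
      intro k hk
      have := hb2 k hk
      omega
    have hw2' := pvWraps_nodup key2 hb2 hnd2
    -- A's loop as a flatMap over the blocks
    rw [PySem.List.foldl_append_eq_flatMap, List.nil_append]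
    -- B's outer loop as a flatMap over the blocks
    rw [pvFoldAppendGen _ (fun bs =>
        [let block0 := PySem.List.slice text.toList (some bs)
            (some (bs + (key1.length : Int) * (key2.length : Int)))
         let block := block0 ++ List.replicate
            (((key1.length : Int) * (key2.length : Int)).toNat - block0.length) ' '
         (PySem.List.pyRange 0 (key1.length : Int) 1).foldl
          (fun o r => (PySem.List.pyRange 0 (key2.length : Int) 1).foldl
            (fun o2 c => PySem.List.pySetD o2
              ((PySem.List.pyGetD key1 r 0 - 1) * (key2.length : Int)
                + (PySem.List.pyGetD key2 c 0 - 1))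
              (PySem.List.pyGetD block (r * (key2.length : Int) + c) ' ')) o)
          (List.replicate ((key1.length : Int) * (key2.length : Int)).toNat ' ')])
      (fun acc bs => rfl), List.nil_append]
    refine congrArg String.ofList ?_
    rw [pvJoinNil_flatten, pvFlattenFlatMap, List.flatMap_def, List.flatMap_def]
    refine congrArg List.flatten (List.map_congr_left fun bs hbs => ?_)
    obtain ⟨hbs0, -, -⟩ := (PySem.List.mem_pyRange_iff_of_pos hpos bs).mp hbs
    have hsl : (PySem.List.slice text.toList (some bs)
        (some (bs + (key1.length : Int) * (key2.length : Int)))).length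
        ≤ key1.length * key2.length := by
      rw [PySem.List.slice_toNat text.toList hbs0
        (by omega : (0 : Int) ≤ bs + (key1.length : Int) * (key2.length : Int))]
      simp only [List.length_take, List.length_drop]
      have hcast : ((key1.length : Int) * (key2.length : Int))
          = ((key1.length * key2.length : Nat) : Int) := by push_cast; ring
      rw [hcast]
      omega
    have hBLlen : (PySem.List.slice text.toList (some bs)
        (some (bs + (key1.length : Int) * (key2.length : Int)))
        ++ List.replicate (((key1.length : Int) * (key2.length : Int)).toNat
          - (PySem.List.slice text.toList (some bs)
              (some (bs + (key1.length : Int) * (key2.length : Int)))).length) ' ').length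
        = key1.length * key2.length := by
      simp only [List.length_append, List.length_replicate]
      have e2 : ((key1.length : Int) * (key2.length : Int)).toNat
          = key1.length * key2.length := by
        have hcast : ((key1.length : Int) * (key2.length : Int))
            = ((key1.length * key2.length : Nat) : Int) := by push_cast; ring
        rw [hcast, Int.toNat_natCast]
      omega
    rw [pvABlockEq key1 key2 _ hne1 hne2 hb1' hb2' hw2' hBLlen]
    show _ = List.flatten [_]
    rw [pvBBlockEq key1 key2 _ hb1 hnd1 hb2 hnd2 hR hC]
    simp
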